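-- pv_equiv track=rewrite | github.com/bioinformatics-ua/PrivacyCDM | src/utils.py | processAttributes
-- ===== SOURCE A (Python) =====
-- def processAttributes(listOfAttributes):
-- 	dictOfAttributes = {}
-- 	for table, field in listOfAttributes:
-- 		table = table.lower()
-- 		if table not in dictOfAttributes:
-- 			dictOfAttributes[table] = []
-- 		dictOfAttributes[table].append(field.lower())
-- 	return dictOfAttributes
-- ===== SOURCE B (Python) =====
-- def processAttributes(listOfAttributes):
-- 	keys = dict.fromkeys(table.lower() for table, _ in listOfAttributes)
-- 	return {k: [field.lower() for table, field in listOfAttributes if table.lower() == k]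
-- 	        for k in keys}
-- ===== Notes on version B (the rewrite author's own statement) =====
-- stated objective: alternative
-- what changed: Replaces A's incremental dict mutation (conditional key init + in-place append per element) with a two-pass scheme: dedup the lowercased table names once, then build each group by a single filtering comprehension over the input.
import Mathlib
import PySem

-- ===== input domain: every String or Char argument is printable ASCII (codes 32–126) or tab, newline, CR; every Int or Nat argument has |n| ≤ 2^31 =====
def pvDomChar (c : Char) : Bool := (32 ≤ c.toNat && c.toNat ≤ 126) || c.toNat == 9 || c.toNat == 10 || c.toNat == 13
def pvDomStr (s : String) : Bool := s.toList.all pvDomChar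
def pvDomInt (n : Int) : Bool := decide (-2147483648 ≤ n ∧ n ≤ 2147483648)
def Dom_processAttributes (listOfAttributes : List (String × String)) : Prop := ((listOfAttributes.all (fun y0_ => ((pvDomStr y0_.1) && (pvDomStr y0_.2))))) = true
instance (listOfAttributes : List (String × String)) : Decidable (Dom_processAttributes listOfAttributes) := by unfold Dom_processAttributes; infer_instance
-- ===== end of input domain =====

-- B replaces A's incremental dict mutation with a two-pass scheme (dedup the
-- lowercased keys, then one filtering pass per key); same result, alternative structure.

-- ===== PORT A =====
-- Python A: for table, field in list: table = table.lower();
--   if table not in d: d[table] = []; d[table].append(field.lower())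
-- 'init-if-absent then append' is exactly Dict.modify with default [].
def processAttributes (listOfAttributes : List (String × String)) : List (String × List String) :=
  (listOfAttributes.foldl
    (fun d p => d.modify (PySem.Str.lower p.1) [] (· ++ [PySem.Str.lower p.2]))
    PySem.Dict.empty).items

-- ===== PORT B =====
def processAttributes_alt (listOfAttributes : List (String × String)) : List (String × List String) :=
  (PySem.List.dedup (listOfAttributes.map (fun p => PySem.Str.lower p.1))).map
    (fun k => (k, (listOfAttributes.filter
                    (fun p => PySem.Str.lower p.1 == k)).map
                  (fun p => PySem.Str.lower p.2)))

-- ===== PRECONDITION & SPEC =====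
def Spec_processAttributes (listOfAttributes : List (String × String)) (out : List (String × List String)) : Prop := out = processAttributes_alt listOfAttributes
instance (listOfAttributes : List (String × String)) (out : List (String × List String)) : Decidable (Spec_processAttributes listOfAttributes out) := by unfold Spec_processAttributes; infer_instance

-- ===== CLAIM (what is proved, stated in full; the proofs are below) =====
def Claim_equal_processAttributes : Prop := ∀ (listOfAttributes : List (String × String)), Dom_processAttributes listOfAttributes → Spec_processAttributes listOfAttributes (processAttributes listOfAttributes)

-- ===== LEMMAS AND PROOFS =====

-- A's fold over the pairs equals the canonical grouping fold over the lowercased pairs.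
lemma processAttributes_eq_fold_lowered (l : List (String × String)) :
    processAttributes l =
    ((l.map (fun p => (PySem.Str.lower p.1, PySem.Str.lower p.2))).foldl
      (fun d p => d.modify p.1 [] (· ++ [p.2])) PySem.Dict.empty).items := by
  simp [processAttributes, List.foldl_map]

-- ===== VERDICT (by name: the statement is the Claim_ definition above) =====
theorem processAttributes_spec : Claim_equal_processAttributes := by
  intro l _
  show processAttributes l = processAttributes_alt l
  rw [processAttributes_eq_fold_lowered]
  set l' : List (String × String) := l.map (fun p => (PySem.Str.lower p.1, PySem.Str.lower p.2)) with hl'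
  set d : PySem.Dict String (List String) :=
    l'.foldl (fun d p => d.modify p.1 [] (· ++ [p.2])) PySem.Dict.empty with hd
  have hnd : d.keys.Nodup := by
    rw [hd]
    exact PySem.Dict.nodup_keys_foldl_modify_key l' (fun p => p.1) [] (fun _ p => (· ++ [p.2]))
      PySem.Dict.empty (by simp)
  have hkeys : d.keys = PySem.List.dedup (l.map (fun p => PySem.Str.lower p.1)) := by
    rw [hd, PySem.Dict.keys_foldl_modify_key]
    simp [PySem.Dict.keys_empty, hl', PySem.Set.update, PySem.Set.ofList_eq_foldl,
      List.map_map, Function.comp_def]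
  rw [PySem.Dict.items_eq_map_keys d hnd [], hkeys]
  unfold processAttributes_alt
  apply List.map_congr_left
  intro k _
  have hget : d.getD k [] =
      (l'.filter (fun p => p.1 == k)).map (fun p => p.2) := by
    rw [hd]
    simpa using PySem.Dict.getD_foldl_modify_append l' PySem.Dict.empty k
  rw [hget, hl', List.filter_map, List.map_map]
  rfl
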